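-- pv_equiv track=rewrite | github.com/datastax/ragstack-ai | ragstack/colbert/colbert_embedding.py | calculate_query_maxlen
-- ===== SOURCE A (Python) =====
-- from typing import Any, List, Union
--
-- def calculate_query_maxlen(
--         tokens: List[List[str]], min_num: int, max_num: int
--     ) -> int:
--     max_token_length = max(len(inner_list) for inner_list in tokens)
--     if max_token_length < min_num:
--         return min_num
--
--     if max_token_length > max_num:
--         return max_num
--
--     power = min_num
--     while power < max_token_length:
--         power = power * 2
--     return power
-- ===== SOURCE B (Python) =====
-- def calculate_query_maxlen(tokens, min_num, max_num):
--     n = 0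
--     for inner in tokens:
--         if n < len(inner):
--             n = len(inner)
--     if n < min_num:
--         return min_num
--     if max_num < n:
--         return max_num
--     q = -(-n // min_num)  # ceil(n / min_num)
--     return min_num << (q - 1).bit_length()
-- ===== Notes on version B (the rewrite author's own statement) =====
-- stated objective: alternative
-- what changed: the max() generator pass becomes an explicit accumulator loop, and the doubling while-loop is replaced by an exact integer closed form: q = ceil(n/min_num) via -(-n//min_num), result = min_num << (q-1).bit_length()
-- outside the precondition, e.g. on calculate_query_maxlen([[]], 0, 5): A returns 0, B raises ZeroDivisionError
import Mathlib
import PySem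

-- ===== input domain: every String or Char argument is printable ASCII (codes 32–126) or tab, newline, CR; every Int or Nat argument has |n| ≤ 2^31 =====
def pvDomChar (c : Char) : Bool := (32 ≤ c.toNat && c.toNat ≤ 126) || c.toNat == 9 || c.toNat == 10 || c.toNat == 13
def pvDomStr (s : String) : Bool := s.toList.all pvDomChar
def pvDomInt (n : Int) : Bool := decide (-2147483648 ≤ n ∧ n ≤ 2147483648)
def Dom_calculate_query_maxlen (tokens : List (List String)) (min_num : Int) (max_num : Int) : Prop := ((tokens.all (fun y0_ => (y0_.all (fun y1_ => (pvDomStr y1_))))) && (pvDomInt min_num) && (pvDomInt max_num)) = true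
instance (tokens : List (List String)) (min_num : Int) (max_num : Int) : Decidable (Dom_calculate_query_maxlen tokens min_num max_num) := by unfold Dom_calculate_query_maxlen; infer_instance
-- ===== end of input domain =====

-- B replaces A's max() generator pass by an explicit accumulator loop and A's doubling
-- while-loop by an exact integer closed form (bit_length of the ceiling quotient);
-- alternative formulation of the same cost (the scan over tokens dominates).

-- ===== PORT A =====
-- max(len(inner_list) for inner_list in tokens): Python's max raises ValueError on an
-- empty sequence; that input is excluded by Pre_, the `.getD 0` default is never reached there.
def pyMaxLenA (tokens : List (List String)) : Int :=
  (PySem.List.max? (tokens.map (fun l => (l.length : Int))) (fun y => y)).getD 0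

-- fuel-bounded transcription of `while power < max_token_length: power = power * 2`;
-- the fuel only makes the recursion total (proved sufficient inside Pre_ below); where
-- Python's loop diverges (non-positive min_num) Pre_ excludes the input.
def whileA : Nat → Int → Int → Int
  | 0, power, _ => power
  | fuel + 1, power, n => if power < n then whileA fuel (power * 2) n else power

def calculate_query_maxlen (tokens : List (List String)) (min_num : Int) (max_num : Int) : Int :=
  let max_token_length := pyMaxLenA tokens
  if max_token_length < min_num then min_num
  else if max_token_length > max_num then max_num
  else whileA max_token_length.toNat min_num max_token_length

-- ===== PORT B =====
-- `n = 0; for inner in tokens: if n < len(inner): n = len(inner)`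
def altMaxLoop : List (List String) → Int → Int
  | [], n => n
  | inner :: rest, n => altMaxLoop rest (if n < (inner.length : Int) then (inner.length : Int) else n)

def calculate_query_maxlen_alt (tokens : List (List String)) (min_num : Int) (max_num : Int) : Int :=
  let n := altMaxLoop tokens 0
  if n < min_num then min_num
  else if max_num < n then max_num
  else
    let q := -(PySem.Int.floordiv (-n) min_num)  -- ceil(n / min_num)
    min_num <<< PySem.Int.bitLength (q - 1)

-- ===== PRECONDITION & SPEC =====
-- Pre_ excludes empty tokens (Python's max raises ValueError) and non-positive min_num when
-- the max token length is ≤ max_num: there A infinite-loops, except for min_num = 0 with max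
-- length 0, where A returns 0 but B's ceiling division raises ZeroDivisionError (cited in claim.json).
def Pre_calculate_query_maxlen (tokens : List (List String)) (min_num : Int) (max_num : Int) : Prop :=
  tokens ≠ [] ∧ (1 ≤ min_num ∨ max_num < (((tokens.map List.length).foldl max 0 : Nat) : Int))
instance (tokens : List (List String)) (min_num : Int) (max_num : Int) : Decidable (Pre_calculate_query_maxlen tokens min_num max_num) := by unfold Pre_calculate_query_maxlen; infer_instance

def pvWitness_calculate_query_maxlen : List (List String) × Int × Int := ([["a"], ["b", "c"]], 2, 8)

def Spec_calculate_query_maxlen (tokens : List (List String)) (min_num : Int) (max_num : Int) (out : Int) : Prop := out = calculate_query_maxlen_alt tokens min_num max_num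
instance (tokens : List (List String)) (min_num : Int) (max_num : Int) (out : Int) : Decidable (Spec_calculate_query_maxlen tokens min_num max_num out) := by unfold Spec_calculate_query_maxlen; infer_instance

-- ===== CLAIM (what is proved, stated in full; the proofs are below) =====
def Claim_equal_calculate_query_maxlen : Prop := ∀ (tokens : List (List String)) (min_num : Int) (max_num : Int), Dom_calculate_query_maxlen tokens min_num max_num → Pre_calculate_query_maxlen tokens min_num max_num → Spec_calculate_query_maxlen tokens min_num max_num (calculate_query_maxlen tokens min_num max_num)

-- ===== LEMMAS AND PROOFS =====

lemma foldl_max_cast (l : List Nat) (a : Nat) :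
    List.foldl max (a : Int) (l.map Int.ofNat) = ((l.foldl max a : Nat) : Int) := by
  induction l generalizing a with
  | nil => rfl
  | cons x xs ih =>
    simp only [List.map_cons, List.foldl_cons, Int.ofNat_eq_natCast, ← Nat.cast_max]
    exact ih (max a x)

lemma pyMaxLenA_eq (tokens : List (List String)) (h : tokens ≠ []) :
    pyMaxLenA tokens = (((tokens.map List.length).foldl max 0 : Nat) : Int) := by
  cases tokens with
  | nil => exact absurd rfl h
  | cons t ts =>
    show (PySem.List.max? ((t.length : Int) :: ts.map (fun l => (l.length : Int))) (fun y => y)).getD 0 = _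
    rw [PySem.List.max?_id_cons]
    have hmm : ts.map (fun l => (l.length : Int)) = (ts.map List.length).map Int.ofNat := by
      rw [List.map_map]; rfl
    rw [Option.getD_some, hmm, foldl_max_cast]
    simp [List.foldl_cons]

lemma altMaxLoop_eq (tokens : List (List String)) (a : Int) :
    altMaxLoop tokens a = List.foldl max a ((tokens.map List.length).map Int.ofNat) := by
  induction tokens generalizing a with
  | nil => rfl
  | cons t ts ih =>
    simp only [altMaxLoop, List.map_cons, List.foldl_cons, Int.ofNat_eq_natCast]
    rw [ih]
    congr 1
    omega

lemma altMaxLoop_eq_pyMax (tokens : List (List String)) (h : tokens ≠ []) :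
    altMaxLoop tokens 0 = pyMaxLenA tokens := by
  rw [altMaxLoop_eq, pyMaxLenA_eq tokens h]
  have : (0 : Int) = ((0 : Nat) : Int) := rfl
  rw [this, foldl_max_cast]

lemma whileA_eq (k : Nat) : ∀ (fuel : Nat) (p n : Int), 1 ≤ p → k ≤ fuel →
    n ≤ p * 2 ^ k → (∀ j : Nat, j < k → p * 2 ^ j < n) → whileA fuel p n = p * 2 ^ k := by
  induction k with
  | zero =>
    intro fuel p n hp _ hle _
    rw [pow_zero, mul_one] at hle ⊢
    cases fuel with
    | zero => rfl
    | succ f => simp only [whileA]; rw [if_neg (not_lt.mpr hle)]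
  | succ k ih =>
    intro fuel p n hp hf hle hlt
    have hpn : p < n := by have := hlt 0 (Nat.succ_pos k); simpa using this
    cases fuel with
    | zero => omega
    | succ f =>
      simp only [whileA]
      rw [if_pos hpn]
      have h1 : n ≤ p * 2 * 2 ^ k := by rw [mul_assoc, ← pow_succ']; exact hle
      have h2 : ∀ j : Nat, j < k → p * 2 * 2 ^ j < n := by
        intro j hj
        have := hlt (j + 1) (by omega)
        rw [mul_assoc, ← pow_succ']
        exact this
      rw [ih f (p * 2) n (by linarith) (by omega) h1 h2, mul_assoc, ← pow_succ']

-- the closed-form exponent satisfies the loop's entry/exit characterisation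
lemma closed_form (m n q : Int) (k : Nat) (hm : 1 ≤ m) (hmn : m ≤ n)
    (hq : -(PySem.Int.floordiv (-n) m) = q) (hk : k = PySem.Int.bitLength (q - 1)) :
    n ≤ m * 2 ^ k ∧ (∀ j : Nat, j < k → m * 2 ^ j < n) ∧ k ≤ n.toNat := by
  have hm0 : 0 < m := by omega
  have hn1 : 1 ≤ n := le_trans hm hmn
  obtain ⟨hq1, hq2⟩ := (PySem.Int.neg_floordiv_neg_eq_iff_of_pos (a := n) (b := m) (q := q) hm0).mp hq
  have hqpos : 1 ≤ q := by nlinarith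
  by_cases hq1' : q = 1
  · have hk0 : k = 0 := by simp [hk, hq1', PySem.Int.bitLength_zero]
    refine ⟨?_, ?_, ?_⟩
    · rw [hk0, pow_zero, mul_one]; nlinarith
    · intro j hj; omega
    · omega
  · have hq2' : 2 ≤ q := by omega
    have hne : q - 1 ≠ 0 := by omega
    have hub : (q - 1).natAbs < 2 ^ k := by rw [hk]; exact PySem.Int.lt_two_pow_bitLength (q - 1)
    have hlb : 2 ^ (k - 1) ≤ (q - 1).natAbs := by rw [hk]; exact PySem.Int.two_pow_bitLength_le (q - 1) hne
    have hcast : ((q - 1).natAbs : Int) = q - 1 := Int.natAbs_of_nonneg (by omega)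
    have hnat1 : 1 ≤ (q - 1).natAbs := Int.natAbs_pos.mpr hne
    have hkpos : 1 ≤ k := by
      by_contra hk0
      have hk0' : k = 0 := by omega
      rw [hk0', pow_zero] at hub
      omega
    have hqk : q - 1 < 2 ^ k := by
      calc q - 1 = ((q - 1).natAbs : Int) := hcast.symm
        _ < ((2 ^ k : Nat) : Int) := by exact_mod_cast hub
        _ = 2 ^ k := by push_cast; ring
    have hqn : q - 1 ≤ n - 1 := by nlinarith
    refine ⟨?_, ?_, ?_⟩
    · have : q ≤ 2 ^ k := by omega
      nlinarith [pow_pos (show (0:Int) < 2 by norm_num) k]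
    · intro j hj
      have hjk : j ≤ k - 1 := by omega
      have h2j : (2:Nat) ^ j ≤ 2 ^ (k - 1) := Nat.pow_le_pow_right (by norm_num) hjk
      have h2q : ((2:Int)) ^ j ≤ q - 1 := by
        calc ((2:Int)) ^ j = (((2:Nat) ^ j : Nat) : Int) := by push_cast; ring
          _ ≤ (((2:Nat) ^ (k-1) : Nat) : Int) := by exact_mod_cast h2j
          _ ≤ ((q - 1).natAbs : Int) := by exact_mod_cast hlb
          _ = q - 1 := hcast
      nlinarith
    · have hklt : k - 1 < 2 ^ (k - 1) := Nat.lt_two_pow_self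
      have h2 : (q - 1).natAbs ≤ n.toNat - 1 := by omega
      omega

theorem calculate_query_maxlen_spec_aux (tokens : List (List String)) (min_num max_num : Int)
    (hpre : Pre_calculate_query_maxlen tokens min_num max_num) :
    calculate_query_maxlen tokens min_num max_num = calculate_query_maxlen_alt tokens min_num max_num := by
  obtain ⟨hne, hdisj⟩ := hpre
  have hmax := pyMaxLenA_eq tokens hne
  simp only [calculate_query_maxlen, calculate_query_maxlen_alt, altMaxLoop_eq_pyMax tokens hne]
  set n := pyMaxLenA tokens with hn
  have hn0 : 0 ≤ n := by rw [hmax]; positivity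
  split_ifs with h1 h2
  · rfl
  · rfl
  · -- min_num ≤ n ≤ max_num
    rw [not_lt] at h1 h2
    have hm1 : 1 ≤ min_num := by
      rcases hdisj with h | h
      · exact h
      · exfalso; rw [← hmax] at h; omega
    obtain ⟨hle, hlt, hfuel⟩ := closed_form min_num n (-(PySem.Int.floordiv (-n) min_num))
      (PySem.Int.bitLength (-(PySem.Int.floordiv (-n) min_num) - 1)) hm1 h1 rfl rfl
    rw [whileA_eq _ n.toNat min_num n hm1 hfuel hle hlt, Int.shiftLeft_eq]

-- ===== VERDICT (by name: the statement is the Claim_ definition above) =====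
theorem calculate_query_maxlen_spec : Claim_equal_calculate_query_maxlen := by
  intro tokens min_num max_num _ hpre
  exact calculate_query_maxlen_spec_aux tokens min_num max_num hpre
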